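-- pv_equiv track=rewrite | github.com/KwanHoo/python_basic | python_code_practice/chyper/Caesar_cipher.py | xor_c
-- ===== SOURCE A (Python) =====
-- def xor_c(s, n):
--     s = list(s)
--     for i in range(len(s)):
--         if s[i].isupper():
--             # s[i] = chr(int(bin(((ord(s[i]) - ord('A') + n) % 26 + ord('A')) ^ n), 2)) # xor->2진수 10진수변환
--             s[i] = chr(int(bin(ord(s[i]) ^ n), 2))
--         elif s[i].islower():
--             # s[i] = chr(int(bin(((ord(s[i]) - ord('a') + n) % 26 + ord('a')) ^ n), 2))
--             s[i] = chr(int(bin(ord(s[i]) ^ n), 2))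
--
--     return "".join(s)
-- ===== SOURCE B (Python) =====
-- def xor_c(s, n):
--     # Divide-and-conquer: split the text in half, transform each half recursively,
--     # concatenate; a single character is XORed with n iff it is a letter.
--     t = "".join(s)
--     if len(t) <= 1:
--         if t and (t.isupper() or t.islower()):
--             return chr(ord(t) ^ n)
--         return t
--     m = len(t) // 2
--     return xor_c(t[:m], n) + xor_c(t[m:], n)
-- ===== Notes on version B (the rewrite author's own statement) =====
-- stated objective: alternative
-- what changed: A's index loop that mutates a char list in place is replaced by a divide-and-conquer recursion: the text is split in half, each half transformed recursively and concatenated, with the single-character base case doing the letter-XOR.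
import Mathlib
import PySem

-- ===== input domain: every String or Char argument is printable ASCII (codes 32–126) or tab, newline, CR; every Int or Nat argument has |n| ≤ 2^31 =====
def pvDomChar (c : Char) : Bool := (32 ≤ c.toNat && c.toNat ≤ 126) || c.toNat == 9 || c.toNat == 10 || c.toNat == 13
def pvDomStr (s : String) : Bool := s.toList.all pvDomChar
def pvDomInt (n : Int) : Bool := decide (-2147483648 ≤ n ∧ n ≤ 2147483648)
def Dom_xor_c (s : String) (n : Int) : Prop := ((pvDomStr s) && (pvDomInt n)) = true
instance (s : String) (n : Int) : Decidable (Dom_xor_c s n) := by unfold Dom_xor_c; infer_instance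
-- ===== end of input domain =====

-- B replaces A's in-place index loop by a divide-and-conquer recursion on halves
-- (alternative decomposition, not claimed faster). Equivalence is about the RETURN
-- value (A rebinds its local list only; no caller-visible mutation).

-- ===== PORT A =====
-- for i in range(len(s)): rebind s[i] through the if/elif branch — transliterated as a
-- structural recursion producing the updated list; chr(int(bin(x), 2)) = chr(x), ported
-- as Char.ofNat (valid exactly under Pre_, where Python's chr does not raise).
def xorLoopA (n : Int) : List Char → List Char
  | [] => []
  | c :: cs =>
    (if PySem.Chars.isupper c then
        Char.ofNat (PySem.Int.bxor (c.toNat : Int) n).toNat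
      else if PySem.Chars.islower c then
        Char.ofNat (PySem.Int.bxor (c.toNat : Int) n).toNat
      else c) :: xorLoopA n cs

def xor_c (s : String) (n : Int) : String :=
  String.ofList (xorLoopA n s.toList)

-- ===== PORT B =====
-- Source B's recursion on the joined text, on its character list: len(t) <= 1 base case
-- (a 1-char string is upper/lower iff its character is), else split at m = len(t)//2
-- (t[:m] / t[m:] with 0 ≤ m ≤ len(t) are exactly take/drop) and recurse on both halves.
def xorAltGo (n : Int) (l : List Char) : List Char :=
  if l.length ≤ 1 then
    match l with
    | [] => []
    | c :: _ =>
      if PySem.Chars.isupper c || PySem.Chars.islower c then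
        [Char.ofNat (PySem.Int.bxor (c.toNat : Int) n).toNat]
      else [c]
  else
    let m := l.length / 2
    xorAltGo n (l.take m) ++ xorAltGo n (l.drop m)
termination_by l.length
decreasing_by
  · simp only [List.length_take]; omega
  · simp only [List.length_drop]; omega

def xor_c_alt (s : String) (n : Int) : String :=
  String.ofList (xorAltGo n s.toList)

-- ===== PRECONDITION & SPEC =====
-- Pre_ excludes inputs where A raises (ValueError/OverflowError from chr: a letter with
-- n < 0, or an XORed codepoint > 0x10FFFF) and, narrowing, letters whose XORed codepoint
-- is a UTF-16 surrogate: there Python A and B both return the same surrogate string,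
-- which a Lean Char cannot represent.
def Pre_xor_c (s : String) (n : Int) : Prop :=
  (s.toList.all (fun c => !(PySem.Chars.isupper c || PySem.Chars.islower c) ||
    (decide (0 ≤ n) && decide (Nat.isValidChar (c.toNat ^^^ n.toNat))))) = true
instance (s : String) (n : Int) : Decidable (Pre_xor_c s n) := by
  unfold Pre_xor_c; infer_instance

def pvWitness_xor_c : String × Int := ("Az b!", 3)

def Spec_xor_c (s : String) (n : Int) (out : String) : Prop := out = xor_c_alt s n
instance (s : String) (n : Int) (out : String) : Decidable (Spec_xor_c s n out) := by
  unfold Spec_xor_c; infer_instance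

-- ===== CLAIM (what is proved, stated in full; the proofs are below) =====
def Claim_equal_xor_c : Prop :=
  ∀ (s : String) (n : Int), Dom_xor_c s n → Pre_xor_c s n → Spec_xor_c s n (xor_c s n)

-- ===== LEMMAS AND PROOFS =====

-- the common per-character transformation both ports compute
def xorChar (n : Int) (c : Char) : Char :=
  if PySem.Chars.isupper c || PySem.Chars.islower c then
    Char.ofNat (PySem.Int.bxor (c.toNat : Int) n).toNat
  else c

theorem xorLoopA_eq_map (n : Int) (l : List Char) :
    xorLoopA n l = l.map (xorChar n) := by
  induction l with
  | nil => rfl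
  | cons c cs ih =>
    simp only [xorLoopA, List.map_cons, ih, List.cons.injEq, and_true, xorChar]
    by_cases hu : PySem.Chars.isupper c <;> by_cases hl : PySem.Chars.islower c <;>
      simp [hu, hl]

theorem xorAltGo_eq_map (n : Int) (l : List Char) :
    xorAltGo n l = l.map (xorChar n) := by
  fun_induction xorAltGo n l
  case case1 => rfl
  case case2 c cs hlet h =>
    cases cs with
    | nil => simp [xorChar, hlet]
    | cons d ds => simp at h
  case case3 c cs hlet h =>
    cases cs with
    | nil => simp [xorChar, hlet]
    | cons d ds => simp at h
  case case4 l h m ih1 ih2 =>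
    simp only [ih1, ih2, ← List.map_append, List.take_append_drop]

-- ===== VERDICT (by name: the statement is the Claim_ definition above) =====
theorem xor_c_spec : Claim_equal_xor_c := by
  intro s n _ _
  unfold Spec_xor_c xor_c xor_c_alt
  rw [xorLoopA_eq_map, xorAltGo_eq_map]
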